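-- pv_equiv track=rewrite | github.com/OGMaRs/ICS-33 | q3helper/q3solution.py | skipper
-- ===== SOURCE A (Python) =====
-- def skipper(iterable,n=0):
--     letter = iter(iterable)
--     for item in letter:
--         for times in range(n):
--             try:
--                 letter.__next__()
--             except:
--                 break
--         yield item
-- ===== SOURCE B (Python) =====
-- def skipper(iterable, n=0):
--     step = n + 1 if n > 0 else 1
--     for i, item in enumerate(iterable):
--         if i % step == 0:
--             yield item
-- ===== Notes on version B (the rewrite author's own statement) =====
-- stated objective: simpler
-- what changed: Replaced the nested skip loop (inner range(n) loop advancing the iterator with a bare except) by one flat enumerate pass that yields exactly the items whose index is a multiple of n+1.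
import Mathlib
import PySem

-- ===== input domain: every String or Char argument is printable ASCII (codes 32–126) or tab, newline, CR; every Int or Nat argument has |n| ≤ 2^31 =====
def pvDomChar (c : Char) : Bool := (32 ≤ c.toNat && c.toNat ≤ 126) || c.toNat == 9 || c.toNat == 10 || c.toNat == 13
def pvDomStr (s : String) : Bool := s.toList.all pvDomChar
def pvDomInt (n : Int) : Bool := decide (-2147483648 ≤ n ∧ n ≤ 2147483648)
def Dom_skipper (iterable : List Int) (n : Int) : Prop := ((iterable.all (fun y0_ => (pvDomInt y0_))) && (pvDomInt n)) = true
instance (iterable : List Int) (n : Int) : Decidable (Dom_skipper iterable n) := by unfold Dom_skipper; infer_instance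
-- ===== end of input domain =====

-- B replaces A's nested skip loops by one flat enumerate pass keeping indices divisible by n+1 (simpler; return value only — both are generators).

-- ===== PORT A =====
-- the inner 'for times in range(n): try next / except: break' loop: each iteration
-- advances the iterator by one; once exhausted, further nexts raise and break —
-- dropping 1 from an empty list is the empty list, so the fold is exact.
-- (lemma above the port because its termination proof cites it by name)
theorem pv_foldl_drop_len {α β : Type} (r : List α) (l : List β) :
    r.foldl (fun acc _ => acc.drop 1) l = l.drop r.length := by
  induction r generalizing l with
  | nil => simp
  | cons a r ih =>
    rw [List.foldl_cons, ih, List.drop_drop, List.length_cons]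
    congr 1
    omega

def skipperGo (n : Int) : List Int → List Int
  | [] => []
  | x :: rest => x :: skipperGo n ((PySem.List.pyRange 0 n 1).foldl (fun acc _ => acc.drop 1) rest)
termination_by xs => xs.length
decreasing_by
  rw [pv_foldl_drop_len]
  simp only [List.length_drop, List.length_cons]
  omega

def skipper (iterable : List Int) (n : Int) : List Int := skipperGo n iterable

-- ===== PORT B =====
def skipper_alt (iterable : List Int) (n : Int) : List Int :=
  let step : Int := if n > 0 then n + 1 else 1
  ((PySem.List.enumerate iterable 0).filter (fun p => PySem.Int.mod p.1 step == 0)).map (·.2)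

-- ===== PRECONDITION & SPEC =====
def Spec_skipper (iterable : List Int) (n : Int) (out : List Int) : Prop := out = skipper_alt iterable n
instance (iterable : List Int) (n : Int) (out : List Int) : Decidable (Spec_skipper iterable n out) := by unfold Spec_skipper; infer_instance

-- ===== CLAIM (what is proved, stated in full; the proofs are below) =====
def Claim_equal_skipper : Prop := ∀ (iterable : List Int) (n : Int), Dom_skipper iterable n → Spec_skipper iterable n (skipper iterable n)

-- ===== LEMMAS AND PROOFS =====

-- filter-and-project of an enumerate, abbreviated
def pvFM (s : Nat) (xs : List Int) (j : Int) : List Int :=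
  ((PySem.List.enumerate xs j).filter (fun p => PySem.Int.mod p.1 (s : Int) == 0)).map (·.2)

theorem pvFM_nil (s : Nat) (j : Int) : pvFM s [] j = [] := by
  simp [pvFM, PySem.List.enumerate_nil]

-- stepping past a non-multiple index consumes s - t heads
theorem pvFM_shift (s : Nat) (_hs : 0 < s) :
    ∀ (xs : List Int) (t q : Nat), 1 ≤ t → t ≤ s →
      pvFM s xs ((q * s + t : Nat) : Int) = pvFM s (xs.drop (s - t)) (((q + 1) * s : Nat) : Int) := by
  intro xs
  induction xs with
  | nil => intro t q _ _; simp [pvFM_nil]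
  | cons x rest ih =>
    intro t q h1 h2
    by_cases hts : t = s
    · rw [hts]
      have h0 : s - s = 0 := by omega
      have h1' : q * s + s = (q + 1) * s := by ring
      rw [h0, h1', List.drop_zero]
    · have hlt : t < s := lt_of_le_of_ne h2 hts
      have hmod : (q * s + t) % s = t := by
        conv_lhs => rw [Nat.add_comm]
        rw [Nat.add_mul_mod_self_right]
        exact Nat.mod_eq_of_lt hlt
      have hdrop : (x :: rest).drop (s - t) = rest.drop (s - t - 1) := by
        have hst : s - t = (s - t - 1) + 1 := by omega
        rw [hst]; simp
      have hcast : ((q * s + t : Nat) : Int) + 1 = ((q * s + (t + 1) : Nat) : Int) := by push_cast; ring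
      rw [pvFM, PySem.List.enumerate_cons]
      rw [List.filter_cons, if_neg (by rw [PySem.Int.mod_natCast]; simp [hmod]; omega)]
      rw [hcast]
      have hih := ih (t + 1) q (by omega) (by omega)
      rw [pvFM] at hih
      rw [hih, hdrop]
      have hst2 : s - (t + 1) = s - t - 1 := by omega
      rw [hst2]

-- main invariant: from an index that is a multiple of s, B's filter computes A's loop
theorem pvFM_go (s : Nat) (n : Int) (hs : s = n.toNat + 1) :
    ∀ (N : Nat) (xs : List Int) (q : Nat), xs.length ≤ N →
      pvFM s xs ((q * s : Nat) : Int) = skipperGo n xs := by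
  intro N
  induction N with
  | zero =>
    intro xs q hlen
    have hx : xs = [] := by cases xs <;> simp_all
    rw [hx, pvFM_nil, skipperGo.eq_def]
  | succ N ih =>
    intro xs q hlen
    cases xs with
    | nil => rw [pvFM_nil, skipperGo.eq_def]
    | cons x rest =>
      have hs0 : 0 < s := by omega
      rw [pvFM, PySem.List.enumerate_cons]
      rw [List.filter_cons, if_pos (by rw [PySem.Int.mod_natCast]; simp [Nat.mul_mod_left])]
      have hcast : ((q * s : Nat) : Int) + 1 = ((q * s + 1 : Nat) : Int) := by push_cast; ring
      rw [List.map_cons, hcast]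
      have hshift := pvFM_shift s hs0 rest 1 q (le_refl 1) hs0
      rw [pvFM] at hshift
      rw [hshift]
      have hrange : (PySem.List.pyRange 0 n 1).foldl (fun acc _ => acc.drop 1) rest
          = rest.drop (s - 1) := by
        rw [pv_foldl_drop_len, PySem.List.length_pyRange_one]
        congr 1; omega
      have hrec := ih (rest.drop (s - 1)) (q + 1) (by simp only [List.length_drop, List.length_cons] at hlen ⊢; omega)
      rw [pvFM] at hrec
      rw [skipperGo.eq_def]
      simp only []
      rw [hrange, ← hrec, pvFM]

theorem pvStep (n : Int) : (if n > 0 then n + 1 else 1) = ((n.toNat + 1 : Nat) : Int) := by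
  split_ifs with h <;> omega

-- ===== VERDICT (by name: the statement is the Claim_ definition above) =====
theorem skipper_spec : Claim_equal_skipper := by
  intro iterable n _
  unfold Spec_skipper skipper skipper_alt
  rw [pvStep]
  have := pvFM_go (n.toNat + 1) n rfl iterable.length iterable 0 (le_refl _)
  rw [pvFM] at this
  simpa using this.symm
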